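-- pv_equiv track=rewrite | github.com/pyember/ember-v2 | src/ember/core/config/loader.py | _normalize_env_key
-- ===== SOURCE A (Python) =====
-- from typing import Any, Dict, List, Optional
--
-- def _normalize_env_key(env_key: str) -> List[str]:
--     """Normalize environment variable key to configuration path.
--
--     Args:
--         env_key: Environment variable key without prefix (e.g., "REGISTRY_AUTO_DISCOVER")
--
--     Returns:
--         List of path segments (e.g., ["registry", "auto_discover"])
--     """
--     # Custom mapping for well-known keys
--     key_mappings = {
--         "REGISTRY_AUTO_DISCOVER": ["registry", "auto_discover"],
--         "LOGGING_LEVEL": ["logging", "level"],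
--     }
--
--     # Check for exact matches first
--     if env_key in key_mappings:
--         return key_mappings[env_key]
--
--     # Default behavior: convert to lowercase and split by underscore
--     path = env_key.lower().split("_")
--
--     # Handle compound words that should stay together
--     compound_words = [
--         "auto_discover",
--         "rate_limit",
--         "api_key",
--         "api_keys",
--         "cost_input",
--         "cost_output",
--     ]
--
--     # Check if any adjacent elements in path should be merged
--     i = 0
--     while i < len(path) - 1:
--         combined = f"{path[i]}_{path[i+1]}"
--         if combined in compound_words:
--             path[i] = combined  # Replace first element with combined
--             path.pop(i + 1)  # Remove second element
--         else:
--             i += 1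
--
--     return path
-- ===== SOURCE B (Python) =====
-- _COMPOUND_WORDS = {
--     "auto_discover",
--     "rate_limit",
--     "api_key",
--     "api_keys",
--     "cost_input",
--     "cost_output",
-- }
--
--
-- def _normalize_env_key(env_key):
--     result = []
--     for tok in env_key.lower().split("_"):
--         if result and result[-1] + "_" + tok in _COMPOUND_WORDS:
--             result[-1] = result[-1] + "_" + tok
--         else:
--             result.append(tok)
--     return result
-- ===== Notes on version B (the rewrite author's own statement) =====
-- stated objective: simpler
-- what changed: Replaces A's in-place while-loop that merges adjacent segments with set/pop and index bookkeeping by a single forward pass that appends each token or merges it into the last accumulated segment, and drops the key_mappings dict whose two entries equal the default path's output.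
import Mathlib
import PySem

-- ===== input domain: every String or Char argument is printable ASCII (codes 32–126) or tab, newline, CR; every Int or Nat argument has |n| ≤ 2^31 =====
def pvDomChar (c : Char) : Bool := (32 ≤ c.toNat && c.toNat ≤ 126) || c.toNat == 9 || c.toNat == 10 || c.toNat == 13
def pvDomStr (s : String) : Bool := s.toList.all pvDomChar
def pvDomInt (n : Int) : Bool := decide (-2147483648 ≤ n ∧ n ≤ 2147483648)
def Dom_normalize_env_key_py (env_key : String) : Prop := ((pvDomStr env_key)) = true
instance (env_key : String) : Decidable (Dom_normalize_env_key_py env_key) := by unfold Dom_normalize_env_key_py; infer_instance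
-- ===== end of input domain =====

-- B replaces A's in-place while/pop adjacency merge by a single forward accumulate-and-look-behind
-- pass and drops the redundant key_mappings dict (its two entries equal the default path's output): simpler.

-- ===== PORT A =====
-- A's in-function compound_words list literal
def pvCompoundWordsA : List String :=
  ["auto_discover", "rate_limit", "api_key", "api_keys", "cost_input", "cost_output"]

-- A's while loop: while i < len(path)-1: merge path[i],path[i+1] in place (set + pop) or i += 1
def pvMergeLoop (path : List String) (i : Nat) : List String :=
  if i < path.length - 1 then
    let combined := path.getD i "" ++ "_" ++ path.getD (i + 1) ""
    if pvCompoundWordsA.contains combined then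
      pvMergeLoop ((path.set i combined).eraseIdx (i + 1)) i
    else
      pvMergeLoop path (i + 1)
  else path
termination_by path.length - i
decreasing_by
  · simp only [List.length_eraseIdx, List.length_set]
    split <;> omega
  · omega

def normalize_env_key_py (env_key : String) : List String :=
  let key_mappings : PySem.Dict String (List String) :=
    PySem.Dict.mk [("REGISTRY_AUTO_DISCOVER", ["registry", "auto_discover"]),
                       ("LOGGING_LEVEL", ["logging", "level"])]
  if key_mappings.contains env_key then key_mappings.getD env_key []
  else
    let path := (PySem.Str.split? (PySem.Str.lower env_key) "_").getD []
    pvMergeLoop path 0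

-- ===== PORT B =====
-- B's module-level compound-words set
def pvCompoundWordsB : PySem.Set String :=
  PySem.Set.ofList ["auto_discover", "rate_limit", "api_key", "api_keys", "cost_input", "cost_output"]

-- B's for loop; result is kept head-reversed so result[-1] is the head
def pvAltLoop (racc : List String) : List String → List String
  | [] => racc.reverse
  | tok :: rest =>
    match racc with
    | [] => pvAltLoop [tok] rest
    | last :: others =>
      if pvCompoundWordsB.contains (last ++ "_" ++ tok) then
        pvAltLoop ((last ++ "_" ++ tok) :: others) rest
      else
        pvAltLoop (tok :: last :: others) rest

def normalize_env_key_py_alt (env_key : String) : List String :=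
  pvAltLoop [] ((PySem.Str.split? (PySem.Str.lower env_key) "_").getD [])

-- ===== PRECONDITION & SPEC =====
def Spec_normalize_env_key_py (env_key : String) (out : List String) : Prop := out = normalize_env_key_py_alt env_key
instance (env_key : String) (out : List String) : Decidable (Spec_normalize_env_key_py env_key out) := by unfold Spec_normalize_env_key_py; infer_instance

-- ===== CLAIM (what is proved, stated in full; the proofs are below) =====
def Claim_equal_normalize_env_key_py : Prop := ∀ (env_key : String), Dom_normalize_env_key_py env_key → Spec_normalize_env_key_py env_key (normalize_env_key_py env_key)

-- ===== LEMMAS AND PROOFS =====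

theorem pvCompounds_eq : pvCompoundWordsB = pvCompoundWordsA := by decide

-- state correspondence: A's path = racc.reverse ++ rest with i = racc.length - 1
theorem pvMergeLoop_eq_altLoop (rest : List String) :
    ∀ (last : String) (others : List String),
      pvMergeLoop ((last :: others).reverse ++ rest) others.length = pvAltLoop (last :: others) rest := by
  induction rest with
  | nil =>
    intro last others
    rw [pvMergeLoop, pvAltLoop]
    rw [if_neg (by simp)]
    simp
  | cons tok rest' ih =>
    intro last others
    rw [pvMergeLoop]
    have hlen : others.length < ((last :: others).reverse ++ tok :: rest').length - 1 := by
      simp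
    rw [if_pos hlen]
    have h1 : ((last :: others).reverse ++ tok :: rest').getD others.length "" = last := by
      have : (last :: others).reverse = others.reverse ++ [last] := by simp
      rw [this, List.append_assoc, List.getD, List.getElem?_append_right (by simp)]
      simp
    have h2 : ((last :: others).reverse ++ tok :: rest').getD (others.length + 1) "" = tok := by
      rw [List.getD, List.getElem?_append_right (by simp)]
      simp
    rw [h1, h2, pvAltLoop]
    simp only [PySem.Set.contains, pvCompounds_eq, List.contains]
    by_cases hc : pvCompoundWordsA.contains (last ++ "_" ++ tok)
    · rw [if_pos hc, if_pos hc]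
      have hset : (((last :: others).reverse ++ tok :: rest').set others.length (last ++ "_" ++ tok)).eraseIdx (others.length + 1)
          = ((last ++ "_" ++ tok) :: others).reverse ++ rest' := by
        have hrev : (last :: others).reverse = others.reverse ++ [last] := by simp
        rw [hrev, List.append_assoc, List.set_append_right _ _ (by simp),
            List.eraseIdx_append_of_length_le (by simp)]
        simp
      rw [hset]
      exact ih (last ++ "_" ++ tok) others
    · rw [if_neg hc, if_neg hc]
      have hre : (last :: others).reverse ++ tok :: rest' = (tok :: last :: others).reverse ++ rest' := by
        simp
      rw [hre]
      have := ih tok (last :: others)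
      simpa using this

theorem pvMergeLoop_zero (toks : List String) : pvMergeLoop toks 0 = pvAltLoop [] toks := by
  cases toks with
  | nil => rw [pvMergeLoop, pvAltLoop]; simp
  | cons t rest =>
    rw [pvAltLoop]
    have := pvMergeLoop_eq_altLoop rest t []
    simpa using this

-- ===== VERDICT (by name: the statement is the Claim_ definition above) =====
theorem normalize_env_key_py_spec : Claim_equal_normalize_env_key_py := by
  intro env_key _
  unfold Spec_normalize_env_key_py normalize_env_key_py normalize_env_key_py_alt
  by_cases h1 : env_key = "REGISTRY_AUTO_DISCOVER"
  · subst h1; decide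
  · by_cases h2 : env_key = "LOGGING_LEVEL"
    · subst h2; decide
    · have hc : (PySem.Dict.mk [("REGISTRY_AUTO_DISCOVER", ["registry", "auto_discover"]),
                   ("LOGGING_LEVEL", ["logging", "level"])] : PySem.Dict String (List String)).contains env_key = false := by
        simp [PySem.Dict.contains_mk]
        exact ⟨fun h => h1 h.symm, fun h => h2 h.symm⟩
      simp only [hc]
      exact pvMergeLoop_zero _
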